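-- pv_equiv track=rewrite | github.com/rebibabo/Plagiarism_Detection | train_BiLSTM.py | sentences_to_spans
-- ===== SOURCE A (Python) =====
-- def sentences_to_spans(preds, indexes):
--     spans = []
--     i = 0
--     N = len(preds)
--
--     while i < N:
--         if preds[i] == 1:
--             start = indexes[i][0]
--             while i + 1 < N and preds[i + 1] == 1:
--                 i += 1
--             end = indexes[i][1]
--             spans.append((start, end))
--         i += 1
--
--     return spans
-- ===== SOURCE B (Python) =====
-- def sentences_to_spans(preds, indexes):
--     N = len(preds)
--     starts = [i for i in range(N) if preds[i] == 1 and (i == 0 or preds[i - 1] != 1)]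
--     ends = [i for i in range(N) if preds[i] == 1 and (i == N - 1 or preds[i + 1] != 1)]
--     return [(indexes[s][0], indexes[e][1]) for s, e in zip(starts, ends)]
-- ===== Notes on version B (the rewrite author's own statement) =====
-- stated objective: alternative
-- what changed: Replaces the outer while loop with an inner run-extending while by detecting run boundaries declaratively: two comprehensions collect run-start and run-end positions, which are zipped into spans.
import Mathlib
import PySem

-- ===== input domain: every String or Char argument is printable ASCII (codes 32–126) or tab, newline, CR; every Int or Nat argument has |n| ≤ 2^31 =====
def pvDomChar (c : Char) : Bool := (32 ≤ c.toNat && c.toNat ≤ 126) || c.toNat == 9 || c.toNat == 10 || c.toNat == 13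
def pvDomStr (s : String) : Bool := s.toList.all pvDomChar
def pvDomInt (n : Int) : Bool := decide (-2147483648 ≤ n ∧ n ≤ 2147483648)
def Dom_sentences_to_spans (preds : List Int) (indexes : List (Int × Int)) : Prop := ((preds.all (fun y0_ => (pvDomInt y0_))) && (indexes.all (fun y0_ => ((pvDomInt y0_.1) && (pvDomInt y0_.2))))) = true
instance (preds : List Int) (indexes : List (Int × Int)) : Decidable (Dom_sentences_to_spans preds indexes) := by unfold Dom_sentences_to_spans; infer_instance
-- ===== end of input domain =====

-- B merges consecutive 1-predictions by listing run starts and run ends with two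
-- comprehensions and zipping them, instead of A's outer while + inner run-extending
-- while (objective: alternative decomposition, same O(n) cost).

-- ===== PORT A =====
-- inner while loop of A: advance i while the next prediction is 1
def pvSkip (preds : List Int) (i : Nat) : Nat :=
  if h : i + 1 < preds.length ∧ preds.getD (i + 1) 0 = 1 then pvSkip preds (i + 1) else i
termination_by preds.length - i
decreasing_by omega

theorem pvSkip_ge (preds : List Int) (i : Nat) : i ≤ pvSkip preds i := by
  unfold pvSkip
  split
  · have := pvSkip_ge preds (i + 1); omega
  · omega
termination_by preds.length - i
decreasing_by omega

-- outer while loop of A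
def pvLoopA (preds : List Int) (indexes : List (Int × Int)) (i : Nat) (spans : List (Int × Int)) : List (Int × Int) :=
  if h : i < preds.length then
    if preds.getD i 0 = 1 then
      let start := (indexes.getD i (0, 0)).1
      let j := pvSkip preds i
      let e := (indexes.getD j (0, 0)).2
      pvLoopA preds indexes (j + 1) (spans ++ [(start, e)])
    else pvLoopA preds indexes (i + 1) spans
  else spans
termination_by preds.length - i
decreasing_by
  · have := pvSkip_ge preds i; omega
  · omega

def sentences_to_spans (preds : List Int) (indexes : List (Int × Int)) : List (Int × Int) :=
  pvLoopA preds indexes 0 []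

-- ===== PORT B =====
def sentences_to_spans_alt (preds : List Int) (indexes : List (Int × Int)) : List (Int × Int) :=
  let N := preds.length
  let starts := (List.range N).filter (fun i => decide (preds.getD i 0 = 1 ∧ (i = 0 ∨ preds.getD (i - 1) 0 ≠ 1)))
  let ends := (List.range N).filter (fun i => decide (preds.getD i 0 = 1 ∧ (i = N - 1 ∨ preds.getD (i + 1) 0 ≠ 1)))
  (starts.zip ends).map (fun p => ((indexes.getD p.1 (0, 0)).1, (indexes.getD p.2 (0, 0)).2))

-- ===== PRECONDITION & SPEC =====
-- Pre_ excludes exactly the inputs on which Python A raises IndexError: a prediction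
-- equal to 1 at a position ≥ len(indexes) (B raises there too).
def Pre_sentences_to_spans (preds : List Int) (indexes : List (Int × Int)) : Prop :=
  ∀ i : Nat, i < preds.length → preds.getD i 0 = 1 → i < indexes.length
instance (preds : List Int) (indexes : List (Int × Int)) : Decidable (Pre_sentences_to_spans preds indexes) := by unfold Pre_sentences_to_spans; infer_instance

def pvWitness_sentences_to_spans : List Int × (List (Int × Int)) :=
  ([1, 0, 1, 1], [(0, 5), (6, 7), (8, 12), (13, 20)])

def Spec_sentences_to_spans (preds : List Int) (indexes : List (Int × Int)) (out : List (Int × Int)) : Prop := out = sentences_to_spans_alt preds indexes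
instance (preds : List Int) (indexes : List (Int × Int)) (out : List (Int × Int)) : Decidable (Spec_sentences_to_spans preds indexes out) := by unfold Spec_sentences_to_spans; infer_instance

-- ===== CLAIM (what is proved, stated in full; the proofs are below) =====
def Claim_equal_sentences_to_spans : Prop := ∀ (preds : List Int) (indexes : List (Int × Int)), Dom_sentences_to_spans preds indexes → Pre_sentences_to_spans preds indexes → Spec_sentences_to_spans preds indexes (sentences_to_spans preds indexes)

-- ===== LEMMAS AND PROOFS =====

-- B's start / end conditions as predicates
def pvCS (preds : List Int) (i : Nat) : Bool :=
  decide (preds.getD i 0 = 1 ∧ (i = 0 ∨ preds.getD (i - 1) 0 ≠ 1))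
def pvCE (preds : List Int) (i : Nat) : Bool :=
  decide (preds.getD i 0 = 1 ∧ (i = preds.length - 1 ∨ preds.getD (i + 1) 0 ≠ 1))

def pvSAux (preds : List Int) (i : Nat) : List Nat :=
  (List.range' i (preds.length - i)).filter (pvCS preds)
def pvEAux (preds : List Int) (i : Nat) : List Nat :=
  (List.range' i (preds.length - i)).filter (pvCE preds)

def pvF (indexes : List (Int × Int)) (p : Nat × Nat) : Int × Int :=
  ((indexes.getD p.1 (0, 0)).1, (indexes.getD p.2 (0, 0)).2)

-- characterisation of A's inner while loop
theorem pvSkip_spec (preds : List Int) (i : Nat) (hi : i < preds.length) (h1 : preds.getD i 0 = 1) :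
    (∀ k, i ≤ k → k ≤ pvSkip preds i → preds.getD k 0 = 1) ∧
    pvSkip preds i < preds.length ∧
    (pvSkip preds i + 1 = preds.length ∨ preds.getD (pvSkip preds i + 1) 0 ≠ 1) := by
  unfold pvSkip
  split
  · rename_i h
    have ih := pvSkip_spec preds (i + 1) h.1 h.2
    refine ⟨?_, ih.2.1, ih.2.2⟩
    intro k hk1 hk2
    rcases Nat.eq_or_lt_of_le hk1 with rfl | hlt
    · exact h1
    · exact ih.1 k hlt hk2
  · rename_i h
    refine ⟨?_, hi, ?_⟩
    · intro k hk1 hk2; have : k = i := by omega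
      subst this; exact h1
    · by_cases hN : i + 1 = preds.length
      · exact Or.inl hN
      · right; intro hv; exact h ⟨by omega, hv⟩
termination_by preds.length - i
decreasing_by omega

-- inside a run, only the first position is a start
theorem pvRun_starts (preds : List Int) (i j : Nat)
    (hrun : ∀ k, i ≤ k → k ≤ j → preds.getD k 0 = 1) :
    (List.range' (i + 1) (j - i)).filter (pvCS preds) = [] := by
  by_cases h : i < j
  · have hd : j - i = (j - (i + 1)) + 1 := by omega
    rw [hd, List.range'_succ, List.filter_cons]
    have hcs : pvCS preds (i + 1) = false := by
      simp only [pvCS, decide_eq_false_iff_not]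
      rintro ⟨-, h0 | hne⟩
      · omega
      · exact hne (by simpa using hrun i le_rfl (by omega))
    rw [hcs]
    exact pvRun_starts preds (i + 1) j (fun k hk1 hk2 => hrun k (by omega) hk2)
  · have : j - i = 0 := by omega
    simp [this]
termination_by j - i
decreasing_by omega

-- inside a run, only the last position is an end
theorem pvRun_ends (preds : List Int) (i j : Nat)
    (hij : i ≤ j) (hj : j < preds.length)
    (hrun : ∀ k, i ≤ k → k ≤ j → preds.getD k 0 = 1)
    (hend : j + 1 = preds.length ∨ preds.getD (j + 1) 0 ≠ 1) :
    (List.range' i (j + 1 - i)).filter (pvCE preds) = [j] := by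
  rcases Nat.eq_or_lt_of_le hij with rfl | hlt
  · have : i + 1 - i = 1 := by omega
    rw [this]
    simp only [List.range'_one, List.filter_cons]
    have hce : pvCE preds i = true := by
      simp only [pvCE, decide_eq_true_eq]
      exact ⟨hrun i le_rfl le_rfl, by omega⟩
    simp [hce]
  · have hd : j + 1 - i = (j + 1 - (i + 1)) + 1 := by omega
    rw [hd, List.range'_succ, List.filter_cons]
    have hce : pvCE preds i = false := by
      simp only [pvCE, decide_eq_false_iff_not]
      rintro ⟨-, hN | hne⟩
      · omega
      · exact hne (hrun (i + 1) (by omega) (by omega))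
    rw [hce]
    exact pvRun_ends preds (i + 1) j (by omega) hj (fun k hk1 hk2 => hrun k (by omega) hk2) hend
termination_by j - i
decreasing_by omega

-- main loop invariant: A's outer loop appends exactly the zipped starts/ends from i
theorem pvLoopA_eq (preds : List Int) (indexes : List (Int × Int)) (i : Nat)
    (spans : List (Int × Int))
    (hinv : i = 0 ∨ preds.getD (i - 1) 0 ≠ 1 ∨ preds.getD i 0 ≠ 1) :
    pvLoopA preds indexes i spans =
      spans ++ ((pvSAux preds i).zip (pvEAux preds i)).map (pvF indexes) := by
  unfold pvLoopA
  split
  · rename_i hi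
    split
    · rename_i h1
      have hspec := pvSkip_spec preds i hi h1
      set j := pvSkip preds i with hj
      have hij : i ≤ j := pvSkip_ge preds i
      have hsplit : List.range' i (preds.length - i) =
          List.range' i (j + 1 - i) ++ List.range' (j + 1) (preds.length - (j + 1)) := by
        have := @List.range'_append i (j + 1 - i) (preds.length - (j + 1)) 1
        simp only [Nat.one_mul] at this
        rw [show i + (j + 1 - i) = j + 1 by omega] at this
        rw [show preds.length - i = (j + 1 - i) + (preds.length - (j + 1)) by omega]
        exact this.symm
      have hrunfirst : List.range' i (j + 1 - i) = i :: List.range' (i + 1) (j - i) := by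
        rw [show j + 1 - i = (j - i) + 1 by omega, List.range'_succ]
      have hcs : pvCS preds i = true := by
        simp only [pvCS, decide_eq_true_eq]
        refine ⟨h1, ?_⟩
        rcases hinv with h | h | h
        · exact Or.inl h
        · exact Or.inr h
        · exact absurd h1 h
      have hS : pvSAux preds i = i :: pvSAux preds (j + 1) := by
        unfold pvSAux
        rw [hsplit, List.filter_append, hrunfirst, List.filter_cons, hcs,
          pvRun_starts preds i j hspec.1]
        simp
      have hE : pvEAux preds i = j :: pvEAux preds (j + 1) := by
        unfold pvEAux
        rw [hsplit, List.filter_append,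
          pvRun_ends preds i j hij hspec.2.1 hspec.1 hspec.2.2]
        simp
      have hinv' : j + 1 = 0 ∨ preds.getD (j + 1 - 1) 0 ≠ 1 ∨ preds.getD (j + 1) 0 ≠ 1 := by
        rcases hspec.2.2 with hN | hne
        · right; right
          rw [List.getD_eq_default]
          · intro hc; exact absurd hc.symm (by norm_num)
          · omega
        · exact Or.inr (Or.inr hne)
      rw [pvLoopA_eq preds indexes (j + 1) _ hinv', hS, hE]
      simp [pvF, List.append_assoc]
    · rename_i h1
      have hcs : pvCS preds i = false := by
        simp only [pvCS, decide_eq_false_iff_not]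
        rintro ⟨hv, -⟩; exact h1 hv
      have hce : pvCE preds i = false := by
        simp only [pvCE, decide_eq_false_iff_not]
        rintro ⟨hv, -⟩; exact h1 hv
      have hhead : List.range' i (preds.length - i) = i :: List.range' (i + 1) (preds.length - (i + 1)) := by
        rw [show preds.length - i = (preds.length - (i + 1)) + 1 by omega, List.range'_succ]
      have hS : pvSAux preds i = pvSAux preds (i + 1) := by
        unfold pvSAux; rw [hhead, List.filter_cons, hcs]; simp
      have hE : pvEAux preds i = pvEAux preds (i + 1) := by
        unfold pvEAux; rw [hhead, List.filter_cons, hce]; simp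
      rw [pvLoopA_eq preds indexes (i + 1) spans (Or.inr (Or.inl (by simpa using h1)))]
      rw [hS, hE]
  · rename_i hi
    have : preds.length - i = 0 := by omega
    simp [pvSAux, pvEAux, this]
termination_by preds.length - i
decreasing_by
  · have := pvSkip_ge preds i; omega
  · omega

-- ===== VERDICT (by name: the statement is the Claim_ definition above) =====
theorem sentences_to_spans_spec : Claim_equal_sentences_to_spans := by
  intro preds indexes _ _
  unfold Spec_sentences_to_spans
  unfold sentences_to_spans sentences_to_spans_alt
  rw [pvLoopA_eq preds indexes 0 [] (Or.inl rfl)]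
  simp only [List.nil_append, pvSAux, pvEAux, List.range_eq_range', Nat.sub_zero]
  rfl
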